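-- pv_equiv track=rewrite | github.com/MonsieurNikko/algo | exographeoriente.py | chainElementary
-- ===== SOURCE A (Python) =====
-- def chainElementary(graph, node):
--     """
--     Retourne toutes les chaînes élémentaires partant de `node`
--     :param graph: dict représentant le graphe {noeud: [voisins]}
--     :param node: sommet de départ
--     :return: liste de chaînes élémentaires (chaque chaîne = liste de noeuds)
--     """
--     chains = []
--
--     def dfs(path, used_edges):
--         current = path[-1]
--         chains.append(path[:])  # ajoute une copie de la chaîne actuelle
--
--         for neighbor in graph.get(current, []):
--             edge = tuple(sorted((current, neighbor)))
--             if neighbor not in path and edge not in used_edges: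
--                 used_edges.add(edge)
--                 dfs(path + [neighbor], used_edges)
--                 used_edges.remove(edge)
--
--     dfs([node], set())
--     return chains
-- ===== SOURCE B (Python) =====
-- def chainElementary(graph, node):
--     """
--     Retourne toutes les chaines elementaires partant de `node`,
--     as a pure recursion: the chains from a path are the path itself followed by
--     the chains of each admissible one-step extension (no mutation, no edge set:
--     a path that never repeats a node never repeats an edge either).
--     """
--     def extend(path):
--         return [path] + [chain
--                          for neighbor in graph.get(path[-1], [])
--                          if neighbor not in path
--                          for chain in extend(path + [neighbor])]
--     return extend([node])
-- ===== Notes on version B (the rewrite author's own statement) =====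
-- stated objective: simpler
-- what changed: A's recursive DFS that mutates an outer chains list and backtracks a used_edges set is replaced by a pure value-returning recursion/comprehension with no accumulator and no edge bookkeeping at all (the used_edges test is provably redundant: a node-elementary path never repeats an edge).
import Mathlib
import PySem

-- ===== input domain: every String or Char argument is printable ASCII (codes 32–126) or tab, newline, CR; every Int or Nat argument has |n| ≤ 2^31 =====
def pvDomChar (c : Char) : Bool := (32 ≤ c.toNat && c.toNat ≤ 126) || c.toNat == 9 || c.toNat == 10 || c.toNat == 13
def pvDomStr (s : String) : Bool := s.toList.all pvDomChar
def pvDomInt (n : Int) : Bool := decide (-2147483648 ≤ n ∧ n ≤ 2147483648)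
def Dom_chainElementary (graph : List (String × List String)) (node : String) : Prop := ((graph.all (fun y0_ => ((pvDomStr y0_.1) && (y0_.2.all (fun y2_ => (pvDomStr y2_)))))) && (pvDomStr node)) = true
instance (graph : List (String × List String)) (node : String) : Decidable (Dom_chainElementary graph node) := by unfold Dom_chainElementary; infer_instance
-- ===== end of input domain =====

-- B replaces A's recursive DFS (mutated outer chains list + backtracked used_edges set) by a
-- pure value-returning recursion with no accumulator and no edge set (redundant on
-- node-elementary paths); the emission order is A's preorder by construction.


-- ===== PORT A =====
-- distinct nodes occurring as neighbor values: an elementary path has at most this many + 1 nodes,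
-- so the fuel below is a pure totality guard (never exhausted; proved in the lemmas)
def pvVals (graph : List (String × List String)) : List String :=
  PySem.List.dedup (graph.flatMap Prod.snd)

-- edge = tuple(sorted((current, neighbor))): sorting a 2-list is min/max by the string order
def pvEdge (a b : String) : String × String := if a ≤ b then (a, b) else (b, a)

def dfsA (graph : List (String × List String)) :
    Nat → List String → PySem.Set (String × String) → List (List String) → List (List String)
  | 0, _, _, chains => chains          -- fuel guard, never reached
  | fuel + 1, path, used, chains =>
    let current := path.getLast?.getD ""   -- path[-1]; path is never empty
    (PySem.Dict.getD (PySem.Dict.mk graph) current []).foldl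
      (fun ch nb =>
        if !path.contains nb && !PySem.Set.contains used (pvEdge current nb) then
          dfsA graph fuel (path ++ [nb]) (PySem.Set.add used (pvEdge current nb)) ch
        else ch)
      (chains ++ [path])
-- note: Python's used_edges.add/.remove around the recursive call restore the set exactly
-- (the edge is absent before the add, by the branch test), so each loop iteration and each
-- recursive call sees the same set value `used` — passing `used.add edge` down is exact.

def chainElementary (graph : List (String × List String)) (node : String) : List (List String) :=
  dfsA graph ((pvVals graph).length + 1) [node] PySem.Set.empty []

-- ===== PORT B =====
-- extend(path): [path] + [chain for neighbor in graph.get(path[-1],[]) if neighbor not in path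
--                               for chain in extend(path + [neighbor])]
def extendB (graph : List (String × List String)) :
    Nat → List String → List (List String)
  | 0, _ => []                         -- fuel guard, never reached
  | depth + 1, path =>
    path :: ((PySem.Dict.getD (PySem.Dict.mk graph) (path.getLast?.getD "") []).filter
               (fun neighbor => !path.contains neighbor)).flatMap
              (fun neighbor => extendB graph depth (path ++ [neighbor]))

def chainElementary_alt (graph : List (String × List String)) (node : String) : List (List String) :=
  extendB graph ((pvVals graph).length + 1) [node]

-- ===== PRECONDITION & SPEC =====
def Spec_chainElementary (graph : List (String × List String)) (node : String) (out : List (List String)) : Prop := out = chainElementary_alt graph node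
instance (graph : List (String × List String)) (node : String) (out : List (List String)) : Decidable (Spec_chainElementary graph node out) := by unfold Spec_chainElementary; infer_instance

-- ===== CLAIM (what is proved, stated in full; the proofs are below) =====
def Claim_equal_chainElementary : Prop := ∀ (graph : List (String × List String)) (node : String), Dom_chainElementary graph node → Spec_chainElementary graph node (chainElementary graph node)

-- ===== LEMMAS AND PROOFS =====

-- admissible paths: nonempty, node-elementary, all nodes after the first are neighbor values
def GoodP (graph : List (String × List String)) (p : List String) : Prop :=
  p ≠ [] ∧ p.Nodup ∧ ∀ x ∈ p.tail, x ∈ pvVals graph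

theorem mem_getD_mem_flat {graph : List (String × List String)} {k nb : String}
    (h : nb ∈ PySem.Dict.getD (PySem.Dict.mk graph) k []) : nb ∈ graph.flatMap Prod.snd := by
  induction graph with
  | nil => simp [PySem.Dict.getD, PySem.Dict.get?] at h
  | cons hd tl ih =>
    rw [PySem.Dict.getD_eq_get?_getD] at h ih
    rw [PySem.Dict.get?_mk_cons] at h
    by_cases hk : hd.1 == k
    · rw [List.flatMap_cons, List.mem_append]; left; simpa [hk] using h
    · rw [List.flatMap_cons, List.mem_append]; right; exact ih (by simpa [hk] using h)

theorem mem_getD_vals {graph : List (String × List String)} {k nb : String}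
    (h : nb ∈ PySem.Dict.getD (PySem.Dict.mk graph) k []) : nb ∈ pvVals graph := by
  unfold pvVals; rw [PySem.List.mem_dedup]; exact mem_getD_mem_flat h

theorem goodP_len {graph : List (String × List String)} {p : List String}
    (h : GoodP graph p) : p.length ≤ (pvVals graph).length + 1 := by
  obtain ⟨hne, hnd, hsub⟩ := h
  cases p with
  | nil => simp
  | cons a t =>
    have htn : t.Nodup := (List.nodup_cons.mp hnd).2
    have : t.length ≤ (pvVals graph).length :=
      (htn.subperm (fun x hx => hsub x (by simpa using hx))).length_le
    simpa using Nat.succ_le_succ this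

theorem goodP_last_mem {p : List String} (hne : p ≠ []) : p.getLast?.getD "" ∈ p := by
  cases hlast : p.getLast? with
  | none => simp [List.getLast?_eq_none_iff] at hlast; exact absurd hlast hne
  | some a => simp [Option.getD]; exact List.mem_of_getLast? hlast

theorem goodP_ext {graph : List (String × List String)} {p : List String} {nb : String}
    (h : GoodP graph p) (hnb : nb ∈ PySem.Dict.getD (PySem.Dict.mk graph) (p.getLast?.getD "") [])
    (hnotin : nb ∉ p) : GoodP graph (p ++ [nb]) := by
  obtain ⟨hne, hnd, hsub⟩ := h
  refine ⟨by simp, ?_, ?_⟩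
  · rw [List.nodup_append]
    exact ⟨hnd, List.nodup_singleton nb, fun a ha => by simp; exact fun h => hnotin (h ▸ ha)⟩
  · intro x hx
    cases p with
    | nil => exact absurd rfl hne
    | cons a t =>
      simp [List.tail] at hx ⊢
      rcases hx with hx | hx
      · exact hsub x (by simpa using hx)
      · subst hx; exact mem_getD_vals hnb

-- A = B : the used_edges test is redundant (every used edge has both endpoints on the path),
-- and with it gone A's fold-with-accumulator emits exactly B's pure preorder recursion
theorem dfsA_eq_extendB (graph : List (String × List String)) :
    ∀ (d : Nat) (p : List String) (used : PySem.Set (String × String)) (chains : List (List String)),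
      GoodP graph p → (pvVals graph).length + 2 ≤ p.length + d →
      (∀ e ∈ used, e.1 ∈ p ∧ e.2 ∈ p) →
      dfsA graph d p used chains = chains ++ extendB graph d p := by
  intro d
  induction d with
  | zero =>
    intro p used chains hg hfuel _
    have := goodP_len hg; omega
  | succ e ih =>
    intro p used chains hg hfuel hused
    rw [dfsA, extendB]
    have hcur : p.getLast?.getD "" ∈ p := goodP_last_mem hg.1
    -- generalize the neighbor list, keeping membership in getD
    have main : ∀ (l : List String), (∀ x ∈ l, x ∈ PySem.Dict.getD (PySem.Dict.mk graph) (p.getLast?.getD "") []) →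
        ∀ init : List (List String),
        l.foldl
          (fun ch nb =>
            if !p.contains nb && !PySem.Set.contains used (pvEdge (p.getLast?.getD "") nb) then
              dfsA graph e (p ++ [nb]) (PySem.Set.add used (pvEdge (p.getLast?.getD "") nb)) ch
            else ch) init
        = init ++ (l.filter (fun nb => !p.contains nb)).flatMap (fun nb => extendB graph e (p ++ [nb])) := by
      intro l
      induction l with
      | nil => intro _ init; simp
      | cons nb t iht =>
        intro hl init
        have hnbmem := hl nb (by simp)
        by_cases hmem : nb ∈ p
        · have hiff : (!p.contains nb && !PySem.Set.contains used (pvEdge (p.getLast?.getD "") nb)) = false := by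
            simp [hmem]
          simp only [List.foldl_cons, hiff, Bool.false_eq_true, if_false]
          rw [iht (fun x hx => hl x (by simp [hx]))]
          simp [hmem]
        · have hedge : PySem.Set.contains used (pvEdge (p.getLast?.getD "") nb) = false := by
            by_contra hc
            have hc' : PySem.Set.contains used (pvEdge (p.getLast?.getD "") nb) = true := by
              cases h : PySem.Set.contains used (pvEdge (p.getLast?.getD "") nb) with
              | false => exact absurd h hc
              | true => rfl
            have hmem2 := (PySem.Set.contains_iff _ _).mp hc'
            have := hused _ hmem2
            unfold pvEdge at this
            split at this
            · exact hmem this.2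
            · exact hmem this.1
          have hedgeP : pvEdge (p.getLast?.getD "") nb ∉ used := fun hc => by
            rw [(PySem.Set.contains_iff _ _).mpr hc] at hedge; cases hedge
          have hiff : (!p.contains nb && !PySem.Set.contains used (pvEdge (p.getLast?.getD "") nb)) = true := by
            simp [hmem, hedgeP]
          simp only [List.foldl_cons, hiff, if_true]
          have hg' := goodP_ext hg hnbmem hmem
          rw [ih (p ++ [nb]) _ init hg' (by simp; omega) ?_]
          · rw [iht (fun x hx => hl x (by simp [hx]))]
            simp [hmem, List.append_assoc]
          · intro ed hed
            rw [PySem.Set.mem_add] at hed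
            rcases hed with hed | hed
            · have := hused _ hed
              exact ⟨by simp [this.1], by simp [this.2]⟩
            · subst hed
              unfold pvEdge
              split <;> simp_all
    rw [main _ (fun x hx => hx) (chains ++ [p])]
    simp

-- ===== VERDICT (by name: the statement is the Claim_ definition above) =====
theorem chainElementary_spec : Claim_equal_chainElementary := by
  intro graph node _
  unfold Spec_chainElementary chainElementary chainElementary_alt
  exact dfsA_eq_extendB graph ((pvVals graph).length + 1) [node] PySem.Set.empty []
    ⟨by simp, by simp, by simp⟩ (by simp only [List.length_singleton]; omega)
    (by intro e he; simp [PySem.Set.empty] at he)
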